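-- pv_equiv track=rewrite | github.com/cirosantilli/project-euler-solutions | solvers/813.py | xor_product
-- ===== SOURCE A (Python) =====
-- def xor_product(x: int, y: int) -> int:
--     """Carryless (XOR) product of nonnegative integers x and y."""
--     if x < 0 or y < 0:
--         raise ValueError("xor_product expects nonnegative integers")
--     res = 0
--     shift = 0
--     while y:
--         if y & 1:
--             res ^= x << shift
--         y >>= 1
--         shift += 1
--     return res
-- ===== SOURCE B (Python) =====
-- def xor_product(x: int, y: int) -> int:
--     """Carryless (XOR) product of nonnegative integers x and y."""
--     if x < 0 or y < 0:
--         raise ValueError("xor_product expects nonnegative integers")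
--     xs = []
--     pos = 0
--     t = x
--     while t:
--         if t & 1:
--             xs.append(pos)
--         t >>= 1
--         pos += 1
--     ys = []
--     pos = 0
--     t = y
--     while t:
--         if t & 1:
--             ys.append(pos)
--         t >>= 1
--         pos += 1
--     res = 0
--     for i in xs:
--         for j in ys:
--             res ^= 1 << (i + j)
--     return res
-- ===== Notes on version B (the rewrite author's own statement) =====
-- stated objective: alternative
-- what changed: Replaces A's single shift-and-XOR scan over y's bits (res ^= x << shift) with a GF(2) polynomial convolution: the set-bit positions of x and y are collected into two lists and a double loop accumulates res ^= 1 << (i+j) over all position pairs.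
import Mathlib
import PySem

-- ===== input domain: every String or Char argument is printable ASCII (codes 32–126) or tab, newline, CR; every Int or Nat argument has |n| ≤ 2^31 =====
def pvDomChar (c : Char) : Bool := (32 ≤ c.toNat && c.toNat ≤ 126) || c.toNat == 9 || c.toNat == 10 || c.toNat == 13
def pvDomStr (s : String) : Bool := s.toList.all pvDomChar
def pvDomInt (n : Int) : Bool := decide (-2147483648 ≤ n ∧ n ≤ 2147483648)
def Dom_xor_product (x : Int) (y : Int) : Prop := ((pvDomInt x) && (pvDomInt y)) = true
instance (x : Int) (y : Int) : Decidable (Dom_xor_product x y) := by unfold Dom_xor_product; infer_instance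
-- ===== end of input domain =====

-- B replaces A's shift-and-XOR scan over y's bits with a set-bit-position convolution
-- (double loop over the bit positions of x and of y, XORing 1 <<< (i+j)); alternative
-- decomposition, similar cost. Equivalence of return values is proved for x ≥ 0, y ≥ 0
-- (A raises ValueError on negative input, which Pre_ excludes).

-- ===== PORT A =====
-- A's while loop over y: res ^= x << shift when y & 1; y >>= 1; shift += 1.
def pvLoopA (x : Nat) (y : Nat) (res : Nat) (shift : Nat) : Nat :=
  if h : y = 0 then res
  else pvLoopA x (y >>> 1) (if y &&& 1 = 1 then res ^^^ (x <<< shift) else res) (shift + 1)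
termination_by y
decreasing_by simp only [Nat.shiftRight_one]; exact Nat.div_lt_self (Nat.pos_of_ne_zero h) one_lt_two

def xor_product (x : Int) (y : Int) : Int :=
  if x < 0 ∨ y < 0 then 0  -- Python raises ValueError here; excluded by Pre_xor_product
  else ((pvLoopA x.toNat y.toNat 0 0 : Nat) : Int)

-- ===== PORT B =====
-- B's while loop collecting the set-bit positions of t, starting at position pos.
def pvBits (t : Nat) (pos : Nat) : List Nat :=
  if h : t = 0 then []
  else (if t &&& 1 = 1 then [pos] else []) ++ pvBits (t >>> 1) (pos + 1)
termination_by t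
decreasing_by simp only [Nat.shiftRight_one]; exact Nat.div_lt_self (Nat.pos_of_ne_zero h) one_lt_two

def xor_product_alt (x : Int) (y : Int) : Int :=
  if x < 0 ∨ y < 0 then 0  -- Python raises ValueError here; excluded by Pre_xor_product
  else
    let xs := pvBits x.toNat 0
    let ys := pvBits y.toNat 0
    ((xs.foldl (fun r i => ys.foldl (fun r j => r ^^^ ((1 : Nat) <<< (i + j))) r) 0 : Nat) : Int)

-- ===== PRECONDITION & SPEC =====
-- Pre_ excludes exactly the inputs on which A raises ValueError (negative x or y).
def Pre_xor_product (x : Int) (y : Int) : Prop := 0 ≤ x ∧ 0 ≤ y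
instance (x : Int) (y : Int) : Decidable (Pre_xor_product x y) := by unfold Pre_xor_product; infer_instance
def pvWitness_xor_product : Int × Int := (6, 5)

def Spec_xor_product (x : Int) (y : Int) (out : Int) : Prop := out = xor_product_alt x y
instance (x : Int) (y : Int) (out : Int) : Decidable (Spec_xor_product x y out) := by unfold Spec_xor_product; infer_instance

-- ===== CLAIM (what is proved, stated in full; the proofs are below) =====
def Claim_equal_xor_product : Prop := ∀ (x : Int) (y : Int), Dom_xor_product x y → Pre_xor_product x y → Spec_xor_product x y (xor_product x y)

-- ===== LEMMAS AND PROOFS =====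

-- XOR-fold of x <<< p over a list of positions.
def xorF (x : Nat) (l : List Nat) : Nat := l.foldl (fun a p => a ^^^ (x <<< p)) 0

theorem foldl_xor_acc (f : Nat → Nat) (l : List Nat) (a : Nat) :
    l.foldl (fun r p => r ^^^ f p) a = a ^^^ l.foldl (fun r p => r ^^^ f p) 0 := by
  induction l generalizing a with
  | nil => simp
  | cons hd tl ih =>
    simp only [List.foldl_cons]
    rw [ih (a ^^^ f hd), ih (0 ^^^ f hd)]
    simp [Nat.xor_assoc]

theorem xorF_nil (x : Nat) : xorF x [] = 0 := rfl

theorem xorF_cons (x p : Nat) (tl : List Nat) : xorF x (p :: tl) = (x <<< p) ^^^ xorF x tl := by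
  unfold xorF
  simp only [List.foldl_cons, Nat.zero_xor]
  exact foldl_xor_acc (fun q => x <<< q) tl (x <<< p)

theorem xorF_append (x : Nat) (l1 l2 : List Nat) :
    xorF x (l1 ++ l2) = xorF x l1 ^^^ xorF x l2 := by
  induction l1 with
  | nil => simp [xorF_nil]
  | cons hd tl ih => simp only [List.cons_append, xorF_cons, ih, Nat.xor_assoc]

theorem shiftLeft_xor_distrib (a b s : Nat) : (a ^^^ b) <<< s = (a <<< s) ^^^ (b <<< s) := by
  apply Nat.eq_of_testBit_eq
  intro i
  simp only [Nat.testBit_shiftLeft, Nat.testBit_xor]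
  cases Decidable.em (s ≤ i) with
  | inl h => simp [h]
  | inr h => simp [h]

theorem xorF_zero (l : List Nat) : xorF 0 l = 0 := by
  induction l with
  | nil => rfl
  | cons hd tl ih => simp [xorF_cons, ih, Nat.zero_shiftLeft]

theorem xorF_xor (a b : Nat) (l : List Nat) : xorF (a ^^^ b) l = xorF a l ^^^ xorF b l := by
  induction l with
  | nil => simp [xorF_nil]
  | cons hd tl ih =>
    simp only [xorF_cons, ih, shiftLeft_xor_distrib]
    -- rearrange XORs
    rw [Nat.xor_assoc, Nat.xor_assoc]
    congr 1
    rw [← Nat.xor_assoc, ← Nat.xor_assoc, Nat.xor_comm (xorF a tl) (b <<< hd)]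

-- the loop of A computes res XOR the xorF of the bit positions of y (offset by shift)
theorem loopA_eq (x : Nat) : ∀ (y : Nat), ∀ (res shift : Nat),
    pvLoopA x y res shift = res ^^^ xorF x (pvBits y shift) := by
  intro y
  induction y using Nat.strong_induction_on with
  | _ y ih =>
    intro res shift
    rw [pvLoopA, pvBits]
    by_cases h : y = 0
    · simp [h, xorF_nil]
    · simp only [h, dite_false]
      have hlt : y >>> 1 < y := by
        simp only [Nat.shiftRight_one]
        exact Nat.div_lt_self (Nat.pos_of_ne_zero h) one_lt_two
      rw [ih (y >>> 1) hlt]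
      rw [xorF_append]
      by_cases hb : y &&& 1 = 1
      · simp only [hb, if_true, xorF_cons, xorF_nil, Nat.xor_zero, Nat.xor_assoc]
      · simp only [hb, if_false, xorF_nil, Nat.zero_xor]

theorem one_xor_two_mul (m : Nat) : 1 ^^^ 2 * m = 2 * m + 1 := by
  apply Nat.eq_of_testBit_eq
  intro i
  cases i with
  | zero => simp
  | succ n =>
    simp only [Nat.testBit_succ, Nat.xor_div_two]
    have h1 : (1 : Nat) / 2 ^^^ 2 * m / 2 = m := by
      have : 2 * m / 2 = m := by omega
      simp [this]
    have h2 : (2 * m + 1) / 2 = m := by omega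
    rw [h1, h2]

-- binary decomposition of a shift: x <<< s = (low bit at s) XOR ((x >>> 1) <<< (s+1))
theorem shift_decomp (x s : Nat) :
    x <<< s = (if x &&& 1 = 1 then 1 <<< s else 0) ^^^ ((x >>> 1) <<< (s + 1)) := by
  have hx : x = 2 * (x / 2) + x % 2 := by omega
  rw [Nat.shiftRight_one]
  rcases Nat.mod_two_eq_zero_or_one x with h | h
  · have hb : ¬ (x &&& 1 = 1) := by rw [Nat.and_one_is_mod, h]; decide
    simp only [hb, if_false, Nat.zero_xor]
    obtain ⟨m, hm⟩ : ∃ m, x = 2 * m := ⟨x / 2, by omega⟩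
    subst hm
    have hm2 : 2 * m / 2 = m := by omega
    rw [hm2, Nat.shiftLeft_eq, Nat.shiftLeft_eq, pow_succ]
    ring
  · have hb : x &&& 1 = 1 := by rw [Nat.and_one_is_mod, h]
    simp only [hb, if_true]
    have h21 : (x / 2) <<< (s + 1) = (2 * (x / 2)) <<< s := by
      rw [Nat.shiftLeft_eq, Nat.shiftLeft_eq, pow_succ]; ring
    rw [h21, ← shiftLeft_xor_distrib, one_xor_two_mul]
    congr 1
    omega

-- B's outer fold over the bit positions of x equals xorF (x <<< s)
theorem bits_fold_eq (l : List Nat) : ∀ (x : Nat), ∀ (s : Nat),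
    (pvBits x s).foldl (fun r i => r ^^^ xorF (1 <<< i) l) 0 = xorF (x <<< s) l := by
  intro x
  induction x using Nat.strong_induction_on with
  | _ x ih =>
    intro s
    rw [pvBits]
    by_cases h : x = 0
    · simp [h, Nat.zero_shiftLeft, xorF_zero]
    · simp only [h, dite_false]
      have hlt : x >>> 1 < x := by
        simp only [Nat.shiftRight_one]
        exact Nat.div_lt_self (Nat.pos_of_ne_zero h) one_lt_two
      rw [List.foldl_append]
      rw [shift_decomp x s, xorF_xor]
      by_cases hb : x &&& 1 = 1
      · simp only [hb, if_true, List.foldl_cons, List.foldl_nil, Nat.zero_xor]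
        rw [foldl_xor_acc (fun i => xorF (1 <<< i) l), ih (x >>> 1) hlt (s + 1)]
      · simp only [hb, if_false, List.foldl_nil, xorF_zero, Nat.zero_xor]
        exact ih (x >>> 1) hlt (s + 1)

-- B's inner fold equals r XOR xorF (1 <<< i) ys
theorem inner_fold_eq (ys : List Nat) (i r : Nat) :
    ys.foldl (fun r j => r ^^^ (1 <<< (i + j))) r = r ^^^ xorF (1 <<< i) ys := by
  have hf : (fun (r j : Nat) => r ^^^ (1 <<< (i + j))) = fun r j => r ^^^ ((1 <<< i) <<< j) := by
    funext r j
    rw [Nat.shiftLeft_add]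
  rw [hf]
  rw [foldl_xor_acc (fun j => (1 <<< i) <<< j) ys r]
  rfl

theorem nat_core (a b : Nat) :
    pvLoopA a b 0 0 =
      (pvBits a 0).foldl (fun r i => (pvBits b 0).foldl (fun r j => r ^^^ ((1 : Nat) <<< (i + j))) r) 0 := by
  have hfun : (fun (r i : Nat) => (pvBits b 0).foldl (fun r j => r ^^^ ((1 : Nat) <<< (i + j))) r)
      = fun r i => r ^^^ xorF (1 <<< i) (pvBits b 0) := by
    funext r i
    exact inner_fold_eq (pvBits b 0) i r
  rw [hfun, bits_fold_eq (pvBits b 0) a 0, loopA_eq a b 0 0, Nat.zero_xor, Nat.shiftLeft_zero]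

-- ===== VERDICT (by name: the statement is the Claim_ definition above) =====
theorem xor_product_spec : Claim_equal_xor_product := by
  intro x y _ hpre
  unfold Spec_xor_product xor_product xor_product_alt
  have hneg : ¬ (x < 0 ∨ y < 0) := by
    rcases hpre with ⟨hx, hy⟩
    push Not
    exact ⟨hx, hy⟩
  simp only [hneg, if_false]
  exact congrArg _ (nat_core x.toNat y.toNat)
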